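-- pv_equiv track=rewrite | github.com/CGATOxford/UMI-tools | umi_tools/umi_methods.py | extractSeqAndQuals
-- ===== SOURCE A (Python) =====
-- def extractSeqAndQuals(seq, quals, umi_bases, cell_bases, discard_bases,
--                        retain_umi=False):
--     '''Remove selected bases from seq and quals
--     '''
--
--     new_seq = ""
--     new_quals = ""
--     umi_quals = ""
--     cell_quals = ""
--
--     ix = 0
--     for base, qual in zip(seq, quals):
--         if ((ix not in discard_bases) and
--             (ix not in cell_bases)):
--
--             # if we are retaining the umi, this base is both seq and umi
--             if retain_umi:
--                 new_quals += qual
--                 new_seq += base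
--                 umi_quals += qual
--
--             else:  # base is either seq or umi
--                 if ix not in umi_bases:
--                     new_quals += qual
--                     new_seq += base
--                 else:
--                     umi_quals += qual
--
--         elif ix in cell_bases:
--             cell_quals += qual
--
--         ix += 1
--
--     return new_seq, new_quals, umi_quals, cell_quals
-- ===== SOURCE B (Python) =====
-- def extractSeqAndQuals(seq, quals, umi_bases, cell_bases, discard_bases,
--                        retain_umi=False):
--     '''Remove selected bases from seq and quals'''
--     pairs = list(enumerate(zip(seq, quals)))
--
--     def kept(ix):
--         return ix not in discard_bases and ix not in cell_bases
--
--     def in_read(ix):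
--         return kept(ix) and (retain_umi or ix not in umi_bases)
--
--     def in_umi(ix):
--         return kept(ix) and (retain_umi or ix in umi_bases)
--
--     new_seq = "".join(b for ix, (b, q) in pairs if in_read(ix))
--     new_quals = "".join(q for ix, (b, q) in pairs if in_read(ix))
--     umi_quals = "".join(q for ix, (b, q) in pairs if in_umi(ix))
--     cell_quals = "".join(q for ix, (b, q) in pairs if ix in cell_bases)
--     return new_seq, new_quals, umi_quals, cell_quals
-- ===== Notes on version B (the rewrite author's own statement) =====
-- stated objective: simpler
-- what changed: Replaces the single stateful loop with five mutable string accumulators by four independent declarative joins over enumerate(zip(seq, quals)), each with its own selection predicate.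
import Mathlib
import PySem

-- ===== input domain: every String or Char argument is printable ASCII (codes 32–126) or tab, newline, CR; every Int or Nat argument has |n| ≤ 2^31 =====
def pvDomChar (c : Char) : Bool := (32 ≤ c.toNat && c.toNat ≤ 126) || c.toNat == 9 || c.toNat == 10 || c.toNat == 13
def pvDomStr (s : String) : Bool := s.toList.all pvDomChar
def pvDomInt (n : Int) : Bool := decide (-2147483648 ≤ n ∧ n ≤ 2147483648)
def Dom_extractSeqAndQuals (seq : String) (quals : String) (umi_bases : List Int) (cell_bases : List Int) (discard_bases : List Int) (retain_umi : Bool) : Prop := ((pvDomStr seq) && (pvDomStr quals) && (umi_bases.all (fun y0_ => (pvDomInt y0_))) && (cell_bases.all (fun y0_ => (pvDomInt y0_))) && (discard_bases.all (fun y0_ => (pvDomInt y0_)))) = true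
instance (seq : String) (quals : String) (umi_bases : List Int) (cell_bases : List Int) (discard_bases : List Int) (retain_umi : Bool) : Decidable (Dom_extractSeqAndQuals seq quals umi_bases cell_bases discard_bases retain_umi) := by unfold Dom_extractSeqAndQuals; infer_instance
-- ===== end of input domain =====

-- B replaces A's single stateful loop by four independent filtered joins over the
-- enumerated zip of seq and quals (objective: simpler decomposition, same cost).

-- ===== PORT A =====
-- one loop step of A: state is (new_seq, new_quals, umi_quals, cell_quals, ix),
-- strings carried as List Char (Python str ↔ List Char; built back into String at the end)
def pvStepA (umi_bases cell_bases discard_bases : List Int) (retain_umi : Bool)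
    (st : List Char × List Char × List Char × List Char × Int) (p : Char × Char) :
    List Char × List Char × List Char × List Char × Int :=
  match st, p with
  | (ns, nq, uq, cq, ix), (base, qual) =>
    if !(discard_bases.contains ix) && !(cell_bases.contains ix) then
      if retain_umi then (ns ++ [base], nq ++ [qual], uq ++ [qual], cq, ix + 1)
      else
        if !(umi_bases.contains ix) then (ns ++ [base], nq ++ [qual], uq, cq, ix + 1)
        else (ns, nq, uq ++ [qual], cq, ix + 1)
    else
      if cell_bases.contains ix then (ns, nq, uq, cq ++ [qual], ix + 1)
      else (ns, nq, uq, cq, ix + 1)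

def extractSeqAndQuals (seq : String) (quals : String) (umi_bases : List Int) (cell_bases : List Int) (discard_bases : List Int) (retain_umi : Bool) : String × String × String × String :=
  match (seq.toList.zip quals.toList).foldl
      (pvStepA umi_bases cell_bases discard_bases retain_umi) ([], [], [], [], 0) with
  | (ns, nq, uq, cq, _) => (String.mk ns, String.mk nq, String.mk uq, String.mk cq)

-- ===== PORT B =====
def extractSeqAndQuals_alt (seq : String) (quals : String) (umi_bases : List Int) (cell_bases : List Int) (discard_bases : List Int) (retain_umi : Bool) : String × String × String × String :=
  let pairs : List (Int × (Char × Char)) := PySem.List.enumerate (seq.toList.zip quals.toList)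
  let kept : Int → Bool := fun ix => !(discard_bases.contains ix) && !(cell_bases.contains ix)
  let inRead : Int → Bool := fun ix => kept ix && (retain_umi || !(umi_bases.contains ix))
  let inUmi : Int → Bool := fun ix => kept ix && (retain_umi || umi_bases.contains ix)
  (String.mk ((pairs.filter (fun p => inRead p.1)).map (fun p => p.2.1)),
   String.mk ((pairs.filter (fun p => inRead p.1)).map (fun p => p.2.2)),
   String.mk ((pairs.filter (fun p => inUmi p.1)).map (fun p => p.2.2)),
   String.mk ((pairs.filter (fun p => cell_bases.contains p.1)).map (fun p => p.2.2)))

-- ===== PRECONDITION & SPEC =====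
def Spec_extractSeqAndQuals (seq : String) (quals : String) (umi_bases : List Int) (cell_bases : List Int) (discard_bases : List Int) (retain_umi : Bool) (out : String × String × String × String) : Prop := out = extractSeqAndQuals_alt seq quals umi_bases cell_bases discard_bases retain_umi
instance (seq : String) (quals : String) (umi_bases : List Int) (cell_bases : List Int) (discard_bases : List Int) (retain_umi : Bool) (out : String × String × String × String) : Decidable (Spec_extractSeqAndQuals seq quals umi_bases cell_bases discard_bases retain_umi out) := by unfold Spec_extractSeqAndQuals; infer_instance

-- ===== CLAIM (what is proved, stated in full; the proofs are below) =====
def Claim_equal_extractSeqAndQuals : Prop := ∀ (seq : String) (quals : String) (umi_bases : List Int) (cell_bases : List Int) (discard_bases : List Int) (retain_umi : Bool), Dom_extractSeqAndQuals seq quals umi_bases cell_bases discard_bases retain_umi → Spec_extractSeqAndQuals seq quals umi_bases cell_bases discard_bases retain_umi (extractSeqAndQuals seq quals umi_bases cell_bases discard_bases retain_umi)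

-- ===== LEMMAS AND PROOFS =====

-- loop invariant: A's fold from an arbitrary state equals the accumulators extended by
-- B's four filtered selections over the enumerated remainder
theorem pvFoldA_eq (umi_bases cell_bases discard_bases : List Int) (retain_umi : Bool)
    (l : List (Char × Char)) :
    ∀ (i : Int) (a b c d : List Char),
    l.foldl (pvStepA umi_bases cell_bases discard_bases retain_umi) (a, b, c, d, i) =
      (a ++ ((PySem.List.enumerate l i).filter (fun p =>
          (!(discard_bases.contains p.1) && !(cell_bases.contains p.1)) &&
          (retain_umi || !(umi_bases.contains p.1)))).map (fun p => p.2.1),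
       b ++ ((PySem.List.enumerate l i).filter (fun p =>
          (!(discard_bases.contains p.1) && !(cell_bases.contains p.1)) &&
          (retain_umi || !(umi_bases.contains p.1)))).map (fun p => p.2.2),
       c ++ ((PySem.List.enumerate l i).filter (fun p =>
          (!(discard_bases.contains p.1) && !(cell_bases.contains p.1)) &&
          (retain_umi || umi_bases.contains p.1))).map (fun p => p.2.2),
       d ++ ((PySem.List.enumerate l i).filter (fun p =>
          cell_bases.contains p.1)).map (fun p => p.2.2),
       i + l.length) := by
  induction l with
  | nil => intro i a b c d; simp [PySem.List.enumerate_nil]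
  | cons hd tl ih =>
    intro i a b c d
    obtain ⟨base, qual⟩ := hd
    simp only [List.foldl_cons, pvStepA, PySem.List.enumerate_cons, List.filter_cons,
      List.length_cons]
    by_cases hdis : (i : Int) ∈ discard_bases
    · by_cases hcell : (i : Int) ∈ cell_bases
      · simp [hdis, hcell, ih, List.append_assoc] <;> omega
      · simp [hdis, hcell, ih, List.append_assoc] <;> omega
    · by_cases hcell : (i : Int) ∈ cell_bases
      · simp [hdis, hcell, ih, List.append_assoc] <;> omega
      · cases retain_umi with
        | true => simp [hdis, hcell, ih, List.append_assoc] <;> omega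
        | false =>
          by_cases humi : (i : Int) ∈ umi_bases
          · simp [hdis, hcell, humi, ih, List.append_assoc] <;> omega
          · simp [hdis, hcell, humi, ih, List.append_assoc] <;> omega

-- ===== VERDICT (by name: the statement is the Claim_ definition above) =====
theorem extractSeqAndQuals_spec : Claim_equal_extractSeqAndQuals := by
  intro seq quals umi_bases cell_bases discard_bases retain_umi _
  unfold Spec_extractSeqAndQuals extractSeqAndQuals extractSeqAndQuals_alt
  rw [pvFoldA_eq]
  simp
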